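-- pv_equiv track=rewrite | github.com/kiwifruit13/HarnessEngineering | skills/planning-with-files/scripts/generate-report.py | extract_findings
-- ===== SOURCE A (Python) =====
-- from typing import Dict, List
--
-- def extract_findings(content: str) -> Dict:
--     """Extract findings statistics."""
--     stats = {
--         "requirements": 0,
--         "research": 0,
--         "decisions": 0,
--         "issues": 0
--     }
--
--     if not content:
--         return stats
--
--     lines = content.split('\n')
--     current_section = None
--
--     for line in lines:
--         if line.startswith('## Requirements'):
--             current_section = "requirements"
--         elif line.startswith('## Research Findings'):
--             current_section = "research"
--         elif line.startswith('## Technical Decisions'):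
--             current_section = "decisions"
--         elif line.startswith('## Issues Encountered'):
--             current_section = "issues"
--         elif line.startswith('##'):
--             current_section = None
--         elif current_section and line.strip() and not line.startswith('#') and line.startswith('-'):
--             stats[current_section] += 1
--
--     return stats
-- ===== SOURCE B (Python) =====
-- def extract_findings(content):
--     """Extract findings statistics (two-pass: partition into sections, then count)."""
--     headers = [
--         ("## Requirements", "requirements"),
--         ("## Research Findings", "research"),
--         ("## Technical Decisions", "decisions"),
--         ("## Issues Encountered", "issues"),
--     ]
--     stats = {key: 0 for _, key in headers}
--     if not content:
--         return stats
--
--     # pass 1: partition the lines into segments (section key or None, body lines)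
--     segments = []
--     key = None
--     body = []
--     for line in content.split('\n'):
--         if line.startswith('##'):
--             segments.append((key, body))
--             key = None
--             for prefix, k in headers:
--                 if line.startswith(prefix):
--                     key = k
--                     break
--             body = []
--         else:
--             body.append(line)
--     segments.append((key, body))
--
--     # pass 2: count bullet lines per section
--     for key, body in segments:
--         if key is not None:
--             stats[key] += sum(1 for line in body if line.startswith('-'))
--     return stats
-- ===== Notes on version B (the rewrite author's own statement) =====
-- stated objective: alternative
-- what changed: B replaces A's single stateful loop (a current-section register updated per line) by two passes: first partition the lines into (section key, body lines) segments at every header boundary, then count each segment's bullet lines into the stats dict.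
import Mathlib
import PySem

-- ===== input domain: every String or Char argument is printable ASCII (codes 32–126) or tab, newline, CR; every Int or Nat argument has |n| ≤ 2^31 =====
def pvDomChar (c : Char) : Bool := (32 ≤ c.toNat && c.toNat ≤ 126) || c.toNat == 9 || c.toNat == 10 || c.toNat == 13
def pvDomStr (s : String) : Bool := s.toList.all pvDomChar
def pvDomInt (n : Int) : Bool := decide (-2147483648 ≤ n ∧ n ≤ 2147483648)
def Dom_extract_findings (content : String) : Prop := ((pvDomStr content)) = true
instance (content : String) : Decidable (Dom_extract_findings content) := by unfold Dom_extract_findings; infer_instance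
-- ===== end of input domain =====

-- B restructures A's single stateful loop into two passes (partition into sections, then count); alternative decomposition, same cost.

-- ===== PORT A =====
-- loop body of A's single pass: state = (stats dict, current_section)
def pvStepA (st : PySem.Dict String Int × Option String) (line : List Char) :
    PySem.Dict String Int × Option String :=
  if PySem.Chars.startswith line "## Requirements".toList then (st.1, some "requirements")
  else if PySem.Chars.startswith line "## Research Findings".toList then (st.1, some "research")
  else if PySem.Chars.startswith line "## Technical Decisions".toList then (st.1, some "decisions")
  else if PySem.Chars.startswith line "## Issues Encountered".toList then (st.1, some "issues")
  else if PySem.Chars.startswith line "##".toList then (st.1, none)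
  else match st.2 with
    | some sec =>
        if PySem.Chars.strip line ≠ [] ∧ PySem.Chars.startswith line "#".toList = false ∧
            PySem.Chars.startswith line "-".toList = true
        then (st.1.modify sec 0 (· + 1), st.2)
        else st
    | none => st

def extract_findings (content : String) : List (String × Int) :=
  let stats : PySem.Dict String Int :=
    PySem.Dict.mk [("requirements", 0), ("research", 0), ("decisions", 0), ("issues", 0)]
  if content = "" then stats.items
  else
    let lines := PySem.Chars.splitOn content.toList ['\n']
    (lines.foldl pvStepA (stats, none)).1.items

-- ===== PORT B =====
def pvHeaders : List (List Char × String) :=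
  [("## Requirements".toList, "requirements"), ("## Research Findings".toList, "research"),
   ("## Technical Decisions".toList, "decisions"), ("## Issues Encountered".toList, "issues")]

-- Source B's inner 'for prefix, k in headers: if line.startswith(prefix): key = k; break'
def pvHeaderKey (line : List Char) : Option String :=
  (pvHeaders.find? (fun hk => PySem.Chars.startswith line hk.1)).map (·.2)

-- pass-1 loop body: state = (segments, key, body)
def pvStepB (st : List (Option String × List (List Char)) × Option String × List (List Char))
    (line : List Char) : List (Option String × List (List Char)) × Option String × List (List Char) :=
  if PySem.Chars.startswith line "##".toList then
    (st.1 ++ [(st.2.1, st.2.2)], pvHeaderKey line, [])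
  else (st.1, st.2.1, st.2.2 ++ [line])

-- pass-2 loop body: add a segment's bullet count to the stats dict
def pvAddSeg (d : PySem.Dict String Int) (seg : Option String × List (List Char)) :
    PySem.Dict String Int :=
  match seg.1 with
  | some k => d.modify k 0 (· + ((seg.2.countP (fun l => PySem.Chars.startswith l "-".toList) : Nat) : Int))
  | none => d

def extract_findings_alt (content : String) : List (String × Int) :=
  let stats : PySem.Dict String Int := PySem.Dict.mk (pvHeaders.map (fun hk => (hk.2, 0)))
  if content = "" then stats.items
  else
    let r := (PySem.Chars.splitOn content.toList ['\n']).foldl pvStepB ([], none, [])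
    ((r.1 ++ [(r.2.1, r.2.2)]).foldl pvAddSeg stats).items

-- ===== PRECONDITION & SPEC =====
def Spec_extract_findings (content : String) (out : List (String × Int)) : Prop := out = extract_findings_alt content
instance (content : String) (out : List (String × Int)) : Decidable (Spec_extract_findings content out) := by unfold Spec_extract_findings; infer_instance

-- ===== CLAIM (what is proved, stated in full; the proofs are below) =====
def Claim_equal_extract_findings : Prop := ∀ (content : String), Dom_extract_findings content → Spec_extract_findings content (extract_findings content)

-- ===== LEMMAS AND PROOFS =====

def pvKeys : List String := ["requirements", "research", "decisions", "issues"]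

-- the segment list pass 1 produces, as a structural recursion
def pvSegs (key : Option String) (body : List (List Char)) :
    List (List Char) → List (Option String × List (List Char))
  | [] => [(key, body)]
  | l :: ls =>
      if PySem.Chars.startswith l "##".toList then
        (key, body) :: pvSegs (pvHeaderKey l) [] ls
      else pvSegs key (body ++ [l]) ls

lemma pvSW_trans {l p q : List Char} (h : PySem.Chars.startswith l p = true) (hq : q <+: p) :
    PySem.Chars.startswith l q = true := by
  rw [PySem.Chars.startswith_iff] at h ⊢
  exact hq.trans h

lemma pvHeaderKey_mem {l : List Char} {k : String} (h : pvHeaderKey l = some k) : k ∈ pvKeys := by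
  unfold pvHeaderKey at h
  rcases Option.map_eq_some_iff.mp h with ⟨hk, hmem, rfl⟩
  have := List.mem_of_find?_eq_some hmem
  fin_cases this <;> simp [pvKeys]

lemma pvStepA_boundary (st : PySem.Dict String Int × Option String) (l : List Char)
    (h : PySem.Chars.startswith l "##".toList = true) : pvStepA st l = (st.1, pvHeaderKey l) := by
  unfold pvStepA pvHeaderKey pvHeaders
  by_cases h1 : PySem.Chars.startswith l "## Requirements".toList = true <;>
    by_cases h2 : PySem.Chars.startswith l "## Research Findings".toList = true <;>
      by_cases h3 : PySem.Chars.startswith l "## Technical Decisions".toList = true <;>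
        by_cases h4 : PySem.Chars.startswith l "## Issues Encountered".toList = true <;>
          simp_all [List.find?]

lemma pvNotBoundary {l h0 : List Char} (h : PySem.Chars.startswith l "##".toList = false)
    (hp : "##".toList <+: h0) : PySem.Chars.startswith l h0 = false := by
  by_contra hc
  rw [Bool.not_eq_false] at hc
  rw [pvSW_trans hc hp] at h
  simp at h

lemma pvDash {l : List Char} (h : PySem.Chars.startswith l "-".toList = true) :
    PySem.Chars.strip l ≠ [] ∧ PySem.Chars.startswith l "#".toList = false := by
  rw [PySem.Chars.startswith_iff] at h
  rcases h with ⟨t, rfl⟩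
  have hl : "-".toList ++ t = '-' :: t := rfl
  rw [hl]
  constructor
  · unfold PySem.Chars.strip PySem.Chars.rstrip PySem.Chars.lstrip
    intro hnil
    rw [List.reverse_eq_nil_iff, List.dropWhile_eq_nil_iff] at hnil
    have hmem : '-' ∈ (List.dropWhile PySem.Chars.isspace ('-' :: t)).reverse := by
      rw [List.dropWhile_cons]
      simp [PySem.Chars.isspace]
    have := hnil _ hmem
    simp [PySem.Chars.isspace] at this
  · rw [PySem.Chars.startswith]
    simp [List.isPrefixOf]

lemma pvModifyComp (d : PySem.Dict String Int) (k : String) (a b : Int) :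
    (d.modify k 0 (· + a)).modify k 0 (· + b) = d.modify k 0 (· + (a + b)) := by
  unfold PySem.Dict.modify
  rw [PySem.Dict.getD_insert_self, PySem.Dict.insert_insert_self]
  simp [add_assoc]

lemma pvInsertGetD {κ ν : Type} [BEq κ] [LawfulBEq κ] (d : PySem.Dict κ ν) (k : κ) (d0 : ν)
    (h : d.contains k = true) (hnd : d.keys.Nodup) : d.insert k (d.getD k d0) = d := by
  apply PySem.Dict.ext
  rw [PySem.Dict.items_insert_of_contains _ _ h]
  conv_rhs => rw [← List.map_id d.items]
  apply List.map_congr_left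
  intro p hp
  by_cases hpk : (p.1 == k) = true
  · have hk : p.1 = k := by exact beq_iff_eq.mp hpk
    have hmem : (k, p.2) ∈ d.items := by rw [← hk]; exact hp
    have hg : d.get? k = some p.2 := PySem.Dict.get?_of_mem_items d hmem hnd
    rw [PySem.Dict.getD, hk, hg]
    simp [← hk]
  · simp [hpk]

lemma pvModifyZero (d : PySem.Dict String Int) (k : String) (h : d.contains k = true)
    (hnd : d.keys.Nodup) : d.modify k 0 (· + (0 : Int)) = d := by
  unfold PySem.Dict.modify
  simpa using pvInsertGetD d k 0 h hnd

lemma pvAddSeg_nil (d : PySem.Dict String Int) (key : Option String)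
    (h : ∀ k, key = some k → d.contains k = true) (hnd : d.keys.Nodup) :
    pvAddSeg d (key, []) = d := by
  cases key with
  | none => rfl
  | some k =>
      unfold pvAddSeg
      simp only [List.countP_nil, Nat.cast_zero]
      exact pvModifyZero d k (h k rfl) hnd

lemma pvAddSeg_contains (d : PySem.Dict String Int) (seg : Option String × List (List Char))
    (s : String) (h : d.contains s = true) : (pvAddSeg d seg).contains s = true := by
  unfold pvAddSeg
  cases seg.1 with
  | none => exact h
  | some k => rw [PySem.Dict.contains_modify, h, Bool.or_true]

lemma pvAddSeg_nodup (d : PySem.Dict String Int) (seg : Option String × List (List Char))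
    (hd : ∀ s ∈ pvKeys, d.contains s = true) (hsk : ∀ k, seg.1 = some k → k ∈ pvKeys)
    (hnd : d.keys.Nodup) : (pvAddSeg d seg).keys.Nodup := by
  unfold pvAddSeg
  cases hseg : seg.1 with
  | none => exact hnd
  | some k =>
      have hc : d.contains k = true := hd k (hsk k hseg)
      rw [PySem.Dict.keys_modify, PySem.Dict.keys_insert_of_contains _ _ hc]
      exact hnd

-- A's per-line step on a body line: all header tests are false
lemma pvStepA_body (d : PySem.Dict String Int) (key : Option String) (l : List Char)
    (h : PySem.Chars.startswith l "##".toList = false) :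
    pvStepA (d, key) l =
      (match key with
       | some sec => if PySem.Chars.startswith l "-".toList = true
                     then (d.modify sec 0 (· + 1), key) else (d, key)
       | none => (d, key)) := by
  unfold pvStepA
  rw [pvNotBoundary h (by decide), pvNotBoundary h (by decide), pvNotBoundary h (by decide),
      pvNotBoundary h (by decide)]
  simp only [Bool.false_eq_true, if_false, h]
  cases key with
  | none => rfl
  | some sec =>
      by_cases hdash : PySem.Chars.startswith l "-".toList = true
      · rcases pvDash hdash with ⟨hs, hh⟩
        simp_all
      · simp_all

lemma pvMain (lines : List (List Char)) : ∀ (key : Option String) (body : List (List Char))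
    (d : PySem.Dict String Int), (∀ k, key = some k → k ∈ pvKeys) →
    (∀ s ∈ pvKeys, d.contains s = true) → d.keys.Nodup →
    (pvSegs key body lines).foldl pvAddSeg d = (lines.foldl pvStepA (pvAddSeg d (key, body), key)).1 := by
  induction lines with
  | nil => intro key body d _ _ _; simp [pvSegs]
  | cons l ls ih =>
      intro key body d hk hd hnd
      by_cases h : PySem.Chars.startswith l "##".toList = true
      · -- boundary line: close the current segment, open a new one
        simp only [pvSegs, h, if_pos, List.foldl_cons]
        rw [pvStepA_boundary _ _ h]
        have hk' : ∀ k, pvHeaderKey l = some k → k ∈ pvKeys := fun k hkk => pvHeaderKey_mem hkk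
        have hd' : ∀ s ∈ pvKeys, (pvAddSeg d (key, body)).contains s = true :=
          fun s hs => pvAddSeg_contains _ _ _ (hd s hs)
        have hnd' : (pvAddSeg d (key, body)).keys.Nodup := pvAddSeg_nodup _ _ hd hk hnd
        rw [ih (pvHeaderKey l) [] (pvAddSeg d (key, body)) hk' hd' hnd',
            pvAddSeg_nil _ _ (fun k hkk => hd' k (pvHeaderKey_mem hkk)) hnd']
      · -- body line: it extends the current segment
        have hb : PySem.Chars.startswith l "##".toList = false := by simpa using h
        rw [show pvSegs key body (l :: ls) = pvSegs key (body ++ [l]) ls from by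
              simp only [pvSegs]; rw [if_neg h],
            List.foldl_cons, ih key (body ++ [l]) d hk hd hnd]
        have hstep : (pvAddSeg d (key, body ++ [l]), key) = pvStepA (pvAddSeg d (key, body), key) l := by
          rw [pvStepA_body _ _ _ hb]
          cases key with
          | none => rfl
          | some sec =>
              by_cases hdash : PySem.Chars.startswith l "-".toList = true
              · simp only [hdash, if_pos]
                have hcnt : (((body ++ [l]).countP
                      (fun l => PySem.Chars.startswith l "-".toList) : Nat) : Int)
                    = ((body.countP (fun l => PySem.Chars.startswith l "-".toList) : Nat) : Int) + 1 := by
                  rw [List.countP_append]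
                  simp [show PySem.Chars.startswith l ['-'] = true from hdash]
                unfold pvAddSeg
                simp only [hcnt]
                rw [← pvModifyComp]
              · simp only [hdash, Bool.false_eq_true, if_false]
                have hcnt : (body ++ [l]).countP (fun l => PySem.Chars.startswith l "-".toList)
                    = body.countP (fun l => PySem.Chars.startswith l "-".toList) := by
                  rw [List.countP_append]
                  simp [show PySem.Chars.startswith l ['-'] = false from by simpa using hdash]
                unfold pvAddSeg
                simp only [hcnt]
        rw [← hstep]

lemma pvBfold (lines : List (List Char)) : ∀ (acc : List (Option String × List (List Char)))
    (key : Option String) (body : List (List Char)),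
    (lines.foldl pvStepB (acc, key, body)).1 ++
      [((lines.foldl pvStepB (acc, key, body)).2.1, (lines.foldl pvStepB (acc, key, body)).2.2)]
      = acc ++ pvSegs key body lines := by
  induction lines with
  | nil => intro acc key body; simp [pvSegs]
  | cons l ls ih =>
      intro acc key body
      by_cases h : PySem.Chars.startswith l "##".toList = true
      · simp only [List.foldl_cons, pvStepB, h, if_pos, pvSegs, ih]
        simp
      · simp only [List.foldl_cons, pvStepB, h, pvSegs, ih]
        simp

-- ===== VERDICT (by name: the statement is the Claim_ definition above) =====
theorem extract_findings_spec : Claim_equal_extract_findings := by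
  unfold Claim_equal_extract_findings Spec_extract_findings
  intro content _
  unfold extract_findings extract_findings_alt
  by_cases hc : content = ""
  · subst hc; decide
  · rw [if_neg hc, if_neg hc]
    dsimp only
    rw [pvBfold, List.nil_append,
        pvMain _ none [] _ (fun k hck => by cases hck) (by decide) (by decide)]
    rw [show pvAddSeg (PySem.Dict.mk (pvHeaders.map (fun hk => (hk.2, (0 : Int))))) (none, []) =
          PySem.Dict.mk [("requirements", 0), ("research", 0), ("decisions", 0), ("issues", 0)] from rfl]
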